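-- pv_equiv track=rewrite | github.com/trai-reza/catalog | generate_original_title_pdf.py | coalesce_paragraphs
-- ===== SOURCE A (Python) =====
-- from typing import List, Optional
--
-- def coalesce_paragraphs(lines: List[str]) -> List[str]:
--     """Group consecutive non-empty lines into paragraphs."""
--     paragraphs = []
--     buffer = []
--
--     for line in lines:
--         stripped = line.strip()
--         if not stripped:
--             if buffer:
--                 paragraphs.append(" ".join(buffer))
--                 buffer = []
--             continue
--         buffer.append(stripped)
--
--     if buffer:
--         paragraphs.append(" ".join(buffer))
--
--     return paragraphs
-- ===== SOURCE B (Python) =====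
-- def _take_run(xs):
--     """Maximal prefix of already-stripped lines that are non-blank."""
--     run = []
--     for x in xs:
--         if not x:
--             break
--         run.append(x)
--     return run
--
--
-- def _runs(xs):
--     """Recursively split a list of stripped lines into joined paragraphs."""
--     if not xs:
--         return []
--     if not xs[0]:
--         return _runs(xs[1:])
--     run = _take_run(xs)
--     return [" ".join(run)] + _runs(xs[len(run):])
--
--
-- def coalesce_paragraphs(lines):
--     """Group consecutive non-empty lines into paragraphs."""
--     return _runs([line.strip() for line in lines])
-- ===== Notes on version B (the rewrite author's own statement) =====
-- stated objective: alternative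
-- what changed: Replaces A's single stateful loop with a mutable buffer and a trailing flush by a strip-first pass followed by structural recursion that extracts each maximal non-blank run as a whole and joins it.
import Mathlib
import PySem

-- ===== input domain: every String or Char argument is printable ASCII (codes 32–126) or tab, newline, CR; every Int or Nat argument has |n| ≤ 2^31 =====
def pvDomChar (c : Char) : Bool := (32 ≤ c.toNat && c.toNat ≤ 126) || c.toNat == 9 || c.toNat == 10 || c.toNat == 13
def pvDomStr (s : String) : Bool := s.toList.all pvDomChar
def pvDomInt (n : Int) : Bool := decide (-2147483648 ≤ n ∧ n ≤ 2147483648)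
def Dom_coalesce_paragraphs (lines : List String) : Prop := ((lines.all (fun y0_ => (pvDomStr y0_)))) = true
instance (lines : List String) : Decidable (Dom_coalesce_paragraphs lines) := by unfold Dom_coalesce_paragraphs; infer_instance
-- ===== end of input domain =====

-- B replaces A's stateful buffer loop with a strip-first pass plus structural recursion on maximal non-blank runs (objective: alternative decomposition).

-- ===== PORT A =====
-- A's loop state: (paragraphs, buffer); trailing flush after the loop.
def cpStepA (st : List String × List String) (line : String) : List String × List String :=
  let stripped := PySem.Str.strip line
  if stripped = "" then
    if st.2 = [] then st else (st.1 ++ [PySem.Str.join " " st.2], [])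
  else
    (st.1, st.2 ++ [stripped])

def coalesce_paragraphs (lines : List String) : List String :=
  let st := lines.foldl cpStepA ([], [])
  if st.2 = [] then st.1 else st.1 ++ [PySem.Str.join " " st.2]

-- ===== PORT B =====
-- maximal prefix of already-stripped lines that are non-blank (Source B's _take_run)
def cpTakeRun : List String → List String
  | [] => []
  | x :: xs => if x = "" then [] else x :: cpTakeRun xs

theorem cpTakeRun_length_le : ∀ xs : List String, (cpTakeRun xs).length ≤ xs.length
  | [] => Nat.le_refl _
  | x :: xs => by
    unfold cpTakeRun
    split
    · simp
    · simpa using cpTakeRun_length_le xs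

-- Source B's _runs: peel one maximal non-blank run at a time
def cpRuns : List String → List String
  | [] => []
  | x :: xs =>
    if x = "" then cpRuns xs
    else
      let run := x :: cpTakeRun xs
      PySem.Str.join " " run :: cpRuns (xs.drop (cpTakeRun xs).length)
termination_by xs => xs.length
decreasing_by
  · simp
  · simp only [List.length_drop, List.length_cons]
    have := cpTakeRun_length_le xs
    omega

def coalesce_paragraphs_alt (lines : List String) : List String :=
  cpRuns (lines.map PySem.Str.strip)

-- ===== PRECONDITION & SPEC =====
def Spec_coalesce_paragraphs (lines : List String) (out : List String) : Prop := out = coalesce_paragraphs_alt lines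
instance (lines : List String) (out : List String) : Decidable (Spec_coalesce_paragraphs lines out) := by unfold Spec_coalesce_paragraphs; infer_instance

-- ===== CLAIM (what is proved, stated in full; the proofs are below) =====
def Claim_equal_coalesce_paragraphs : Prop := ∀ (lines : List String), Dom_coalesce_paragraphs lines → Spec_coalesce_paragraphs lines (coalesce_paragraphs lines)

-- ===== LEMMAS AND PROOFS =====

-- A's step applied to an already-stripped line (the fold rephrased over pre-stripped lines)
def cpStepS (st : List String × List String) (x : String) : List String × List String :=
  if x = "" then
    if st.2 = [] then st else (st.1 ++ [PySem.Str.join " " st.2], [])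
  else
    (st.1, st.2 ++ [x])

theorem foldl_stepA_eq_stepS (lines : List String) (st : List String × List String) :
    lines.foldl cpStepA st = (lines.map PySem.Str.strip).foldl cpStepS st := by
  induction lines generalizing st with
  | nil => rfl
  | cons l ls ih =>
    simp only [List.foldl_cons, List.map_cons]
    rw [ih]
    rfl

def cpFinish (st : List String × List String) : List String :=
  if st.2 = [] then st.1 else st.1 ++ [PySem.Str.join " " st.2]

-- the key invariant: finishing A's fold from state (ps, buf) yields ps ++ (runs with pending buffer buf)
theorem cp_invariant : ∀ (s : List String),
    (∀ ps : List String, cpFinish (s.foldl cpStepS (ps, [])) = ps ++ cpRuns s) ∧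
    (∀ ps buf : List String, buf ≠ [] →
      cpFinish (s.foldl cpStepS (ps, buf)) =
        ps ++ (PySem.Str.join " " (buf ++ cpTakeRun s) :: cpRuns (s.drop (cpTakeRun s).length)))
  | [] => by
    constructor
    · intro ps; simp [cpFinish, cpRuns]
    · intro ps buf hbuf; simp [cpFinish, cpRuns, cpTakeRun, hbuf]
  | x :: xs => by
    have IH := cp_invariant xs
    constructor
    · intro ps
      by_cases hx : x = ""
      · simp only [List.foldl_cons]
        rw [show cpStepS (ps, []) x = (ps, []) by simp [cpStepS, hx]]
        rw [IH.1 ps]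
        simp [cpRuns, hx]
      · simp only [List.foldl_cons]
        rw [show cpStepS (ps, []) x = (ps, [x]) by simp [cpStepS, hx]]
        rw [IH.2 ps [x] (by simp)]
        simp [cpRuns, hx]
    · intro ps buf hbuf
      by_cases hx : x = ""
      · simp only [List.foldl_cons]
        rw [show cpStepS (ps, buf) x = (ps ++ [PySem.Str.join " " buf], []) by
              simp [cpStepS, hx, hbuf]]
        rw [IH.1 (ps ++ [PySem.Str.join " " buf])]
        simp [cpRuns, cpTakeRun, hx]
      · simp only [List.foldl_cons]
        rw [show cpStepS (ps, buf) x = (ps, buf ++ [x]) by simp [cpStepS, hx]]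
        rw [IH.2 ps (buf ++ [x]) (by simp)]
        simp only [cpTakeRun, if_neg hx]
        simp [List.append_assoc]
termination_by s => s.length

-- ===== VERDICT (by name: the statement is the Claim_ definition above) =====
theorem coalesce_paragraphs_spec : Claim_equal_coalesce_paragraphs := by
  intro lines _
  show coalesce_paragraphs lines = coalesce_paragraphs_alt lines
  unfold coalesce_paragraphs coalesce_paragraphs_alt
  rw [foldl_stepA_eq_stepS]
  exact (cp_invariant (lines.map PySem.Str.strip)).1 []
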